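-- pv_equiv track=rewrite | github.com/Lceoliu/ShanghaiTech-Course-Select | backend_login_test.py | brute_force_pwd_generate
-- ===== SOURCE A (Python) =====
-- def brute_force_pwd_generate(
--     lexi_index, min_len, max_len, use_number=False, use_capital=False, use_special=False
-- ):
--     # 0: number, 1: capital, 2: special
--     char_set = ['0123456789', 'ABCDEFGHIJKLMNOPQRSTUVWXYZ', '!@#$%^&*()_+']
--     char_set_str = ''
--     if use_number:
--         char_set_str += char_set[0]
--     if use_capital:
--         char_set_str += char_set[1]
--     if use_special:
--         char_set_str += char_set[2]
--     if not use_number and not use_capital and not use_special: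
--         char_set_str = char_set[1].lower()
--     char_set_len = len(char_set_str)
--     pwd = ''
--     while lexi_index > 0:
--         pwd += char_set_str[lexi_index % char_set_len]
--         lexi_index = lexi_index // char_set_len
--     pwd = pwd.ljust(min_len, char_set_str[0])
--     return pwd[::-1]
-- ===== SOURCE B (Python) =====
-- def brute_force_pwd_generate(
--     lexi_index, min_len, max_len, use_number=False, use_capital=False, use_special=False
-- ):
--     sets = ['0123456789', 'ABCDEFGHIJKLMNOPQRSTUVWXYZ', '!@#$%^&*()_+']
--     flags = [use_number, use_capital, use_special]
--     cs = ''.join(s for s, f in zip(sets, flags) if f) or 'abcdefghijklmnopqrstuvwxyz'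
--     L = len(cs)
--
--     def render(i):
--         # most-significant digit first, recursively; '' for i <= 0
--         return '' if i <= 0 else render(i // L) + cs[i % L]
--
--     s = render(lexi_index)
--     return cs[0] * (min_len - len(s)) + s
-- ===== Notes on version B (the rewrite author's own statement) =====
-- stated objective: alternative
-- what changed: A accumulates digits least-significant-first in a while loop, right-pads with ljust and reverses at the end; B recursively renders the number most-significant-first (render(i//L) + cs[i%L]) and prepends the pad cs[0]*(min_len-len) directly, so no ljust and no reversal happen.
import Mathlib
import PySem

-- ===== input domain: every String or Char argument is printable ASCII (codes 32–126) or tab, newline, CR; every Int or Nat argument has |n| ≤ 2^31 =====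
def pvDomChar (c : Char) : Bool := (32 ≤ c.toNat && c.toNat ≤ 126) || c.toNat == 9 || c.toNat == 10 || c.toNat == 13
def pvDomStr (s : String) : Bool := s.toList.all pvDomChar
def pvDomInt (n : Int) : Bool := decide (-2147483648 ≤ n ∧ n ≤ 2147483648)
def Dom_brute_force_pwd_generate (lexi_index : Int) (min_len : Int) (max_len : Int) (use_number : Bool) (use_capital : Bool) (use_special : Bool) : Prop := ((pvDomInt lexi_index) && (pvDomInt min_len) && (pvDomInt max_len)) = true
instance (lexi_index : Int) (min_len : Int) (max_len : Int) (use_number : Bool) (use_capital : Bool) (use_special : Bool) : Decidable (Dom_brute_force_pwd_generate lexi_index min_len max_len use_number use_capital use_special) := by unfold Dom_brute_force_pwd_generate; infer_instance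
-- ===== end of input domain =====

-- B replaces A's build-LSB-then-ljust-then-reverse while loop by a recursive
-- most-significant-first rendering render(i//L) + cs[i%L] with the pad prepended
-- directly (alternative decomposition, same cost).

-- ===== PORT A =====
-- char_set_str built exactly as in A (the all-false branch is char_set[1].lower())
def pvCharSetA (use_number use_capital use_special : Bool) : List Char :=
  let cs : List Char := []
  let cs := if use_number then cs ++ "0123456789".toList else cs
  let cs := if use_capital then cs ++ "ABCDEFGHIJKLMNOPQRSTUVWXYZ".toList else cs
  let cs := if use_special then cs ++ "!@#$%^&*()_+".toList else cs
  if !use_number && !use_capital && !use_special then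
    PySem.Chars.lower "ABCDEFGHIJKLMNOPQRSTUVWXYZ".toList
  else cs

-- A's while loop; fuel = lexi_index.toNat is enough since idx shrinks each step
def pvLoopA (cs : List Char) (L : Int) : Nat → Int → List Char → List Char
  | 0, _, pwd => pwd
  | fuel+1, idx, pwd =>
    if idx > 0 then
      pvLoopA cs L fuel (PySem.Int.floordiv idx L)
        (pwd ++ [PySem.List.pyGetD cs (PySem.Int.mod idx L) ' '])
    else pwd

def brute_force_pwd_generate (lexi_index : Int) (min_len : Int) (max_len : Int) (use_number : Bool) (use_capital : Bool) (use_special : Bool) : String :=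
  let cs := pvCharSetA use_number use_capital use_special
  let L : Int := cs.length
  let pwd := pvLoopA cs L lexi_index.toNat lexi_index []
  -- pwd.ljust(min_len, cs[0])
  let pwd := pwd ++ List.replicate (min_len - pwd.length).toNat (PySem.List.pyGetD cs 0 ' ')
  String.mk pwd.reverse

-- ===== PORT B =====
-- ''.join(s for s, f in zip(sets, flags) if f) or lowercase fallback
def pvCharSetB (use_number use_capital use_special : Bool) : List Char :=
  let joined :=
    (([("0123456789".toList, use_number),
       ("ABCDEFGHIJKLMNOPQRSTUVWXYZ".toList, use_capital),
       ("!@#$%^&*()_+".toList, use_special)].filter (·.2)).map (·.1)).flatten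
  if joined.isEmpty then "abcdefghijklmnopqrstuvwxyz".toList else joined

-- used by pvRender's termination proof
lemma pvRender_dec {i L : Int} (hi : i > 0) (hL : 2 ≤ L) :
    (PySem.Int.floordiv i L).toNat < i.toNat := by
  rw [PySem.Int.floordiv_eq_ediv_of_pos (by omega),
    show i = ((i.toNat : Nat) : Int) by omega, show L = ((L.toNat : Nat) : Int) by omega,
    ← Int.natCast_div, Int.toNat_natCast, Int.toNat_natCast]
  exact Nat.div_lt_self (by omega) (by omega)

-- render(i) = '' if i <= 0 else render(i // L) + cs[i % L]
def pvRender (cs : List Char) (L : Int) (hL : 2 ≤ L) (i : Int) : List Char :=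
  if h : i > 0 then
    pvRender cs L hL (PySem.Int.floordiv i L) ++ [PySem.List.pyGetD cs (PySem.Int.mod i L) ' ']
  else []
  termination_by i.toNat
  decreasing_by exact pvRender_dec h hL

-- used by the port to call pvRender
lemma pvCharSetB_len (un uc us : Bool) : 2 ≤ ((pvCharSetB un uc us).length : Int) := by
  revert un uc us; decide

def brute_force_pwd_generate_alt (lexi_index : Int) (min_len : Int) (max_len : Int) (use_number : Bool) (use_capital : Bool) (use_special : Bool) : String :=
  let cs := pvCharSetB use_number use_capital use_special
  let s := pvRender cs cs.length (pvCharSetB_len use_number use_capital use_special) lexi_index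
  String.mk (List.replicate (min_len - s.length).toNat (PySem.List.pyGetD cs 0 ' ') ++ s)

-- ===== PRECONDITION & SPEC =====
def Spec_brute_force_pwd_generate (lexi_index : Int) (min_len : Int) (max_len : Int) (use_number : Bool) (use_capital : Bool) (use_special : Bool) (out : String) : Prop := out = brute_force_pwd_generate_alt lexi_index min_len max_len use_number use_capital use_special
instance (lexi_index : Int) (min_len : Int) (max_len : Int) (use_number : Bool) (use_capital : Bool) (use_special : Bool) (out : String) : Decidable (Spec_brute_force_pwd_generate lexi_index min_len max_len use_number use_capital use_special out) := by unfold Spec_brute_force_pwd_generate; infer_instance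

-- ===== CLAIM (what is proved, stated in full; the proofs are below) =====
def Claim_equal_brute_force_pwd_generate : Prop := ∀ (lexi_index : Int) (min_len : Int) (max_len : Int) (use_number : Bool) (use_capital : Bool) (use_special : Bool), Dom_brute_force_pwd_generate lexi_index min_len max_len use_number use_capital use_special → Spec_brute_force_pwd_generate lexi_index min_len max_len use_number use_capital use_special (brute_force_pwd_generate lexi_index min_len max_len use_number use_capital use_special)

-- ===== LEMMAS AND PROOFS =====

-- base-b digits of m, least significant first
def digN (b : Nat) (m : Nat) : List Nat :=
  if h : 2 ≤ b ∧ 0 < m then (m % b) :: digN b (m / b) else []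
  termination_by m
  decreasing_by exact Nat.div_lt_self h.2 (by omega)

lemma digN_zero (b : Nat) : digN b 0 = [] := by
  rw [digN]; simp

lemma digN_pos {b m : Nat} (hb : 2 ≤ b) (hm : 0 < m) :
    digN b m = (m % b) :: digN b (m / b) := by
  rw [digN]; simp [hb, hm]

lemma loopA_eq (cs : List Char) {b : Nat} (hb : 2 ≤ b) :
    ∀ (fuel m : Nat) (pwd : List Char), m ≤ fuel →
      pvLoopA cs (b : Int) fuel (m : Int) pwd
        = pwd ++ (digN b m).map (fun k => cs.getD k ' ') := by
  intro fuel
  induction fuel with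
  | zero => intro m pwd h; interval_cases m; simp [pvLoopA, digN_zero]
  | succ fuel ih =>
    intro m pwd h
    by_cases hm : 0 < m
    · have hpos : ((m : Int) > 0) := by exact_mod_cast hm
      rw [pvLoopA, if_pos hpos, PySem.Int.floordiv_natCast, PySem.Int.mod_natCast,
        PySem.List.pyGetD_natCast]
      have hle : m / b ≤ fuel := by
        have := Nat.div_lt_self hm (by omega : 1 < b); omega
      rw [ih (m / b) _ hle, digN_pos hb hm]
      simp
    · have hm0 : m = 0 := by omega
      subst hm0
      rw [pvLoopA, if_neg (by simp), digN_zero]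
      simp

lemma loopA_full (cs : List Char) (hb : 2 ≤ cs.length) (li : Int) :
    pvLoopA cs (cs.length : Int) li.toNat li []
      = (digN cs.length li.toNat).map (fun k => cs.getD k ' ') := by
  by_cases h : 0 < li
  · have hli : li = (li.toNat : Int) := by omega
    nth_rewrite 2 [hli]
    exact (loopA_eq cs hb li.toNat li.toNat [] le_rfl).trans (by simp)
  · have h0 : li.toNat = 0 := by omega
    rw [h0]
    simp [pvLoopA, digN_zero]

lemma render_eq (cs : List Char) {b : Nat} (hb : 2 ≤ b) (hbc : b = cs.length)
    (hL : 2 ≤ ((cs.length : Nat) : Int)) :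
    ∀ m : Nat, pvRender cs (cs.length : Int) hL (m : Int)
      = ((digN b m).map (fun k => cs.getD k ' ')).reverse := by
  intro m
  induction m using Nat.strong_induction_on with
  | _ m ih =>
    by_cases hm : 0 < m
    · have hpos : ((m : Int) > 0) := by exact_mod_cast hm
      rw [pvRender, dif_pos hpos]
      subst hbc
      rw [PySem.Int.floordiv_natCast, PySem.Int.mod_natCast, PySem.List.pyGetD_natCast,
        ih (m / cs.length) (Nat.div_lt_self hm (by omega)), digN_pos hb hm]
      simp
    · have hm0 : m = 0 := by omega
      subst hm0
      rw [pvRender, dif_neg (by simp), digN_zero]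
      simp

lemma render_full (cs : List Char) {b : Nat} (hb : 2 ≤ b) (hbc : b = cs.length)
    (hL : 2 ≤ ((cs.length : Nat) : Int)) (li : Int) :
    pvRender cs (cs.length : Int) hL li
      = ((digN b li.toNat).map (fun k => cs.getD k ' ')).reverse := by
  by_cases h : 0 < li
  · have hli : li = (li.toNat : Int) := by omega
    nth_rewrite 1 [hli]
    exact render_eq cs hb hbc hL li.toNat
  · have h0 : li.toNat = 0 := by omega
    rw [pvRender, dif_neg (by omega), h0, digN_zero]
    simp

lemma charSets_eq : ∀ un uc us, pvCharSetA un uc us = pvCharSetB un uc us := by decide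

lemma charSetA_len : ∀ un uc us, 2 ≤ (pvCharSetA un uc us).length := by decide

-- ===== VERDICT (by name: the statement is the Claim_ definition above) =====
theorem brute_force_pwd_generate_spec : Claim_equal_brute_force_pwd_generate := by
  intro li ml mx un uc us _
  unfold Spec_brute_force_pwd_generate
  simp only [brute_force_pwd_generate, brute_force_pwd_generate_alt, charSets_eq un uc us]
  have hb : 2 ≤ (pvCharSetB un uc us).length := by
    rw [← charSets_eq un uc us]; exact charSetA_len un uc us
  rw [loopA_full _ hb li, render_full (pvCharSetB un uc us) hb rfl _ li,
    List.reverse_append, List.reverse_replicate, PySem.List.pyGetD_zero]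
  simp
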